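-- pv_equiv track=rewrite | github.com/IvanYagual/ADA | Algoritmo Dividir y Venceraz/DyV.py | direct_method
-- ===== SOURCE A (Python) =====
-- def direct_method(letters_str, whole_num):
--     """
--     Encuentra la subcadena de longitud `whole_num` con la mayor diferencia total en los valores ASCII
--     entre caracteres consecutivos en una cadena dada.
--
--     Parámetros:
--         letters_str (str): Cadena de letras sobre la que se realiza el análisis.
--         whole_num (int): Tamaño de la subcadena (ventana deslizante).
--
--     Devuelve:
--         tuple: Tupla con dos elementos:
--             - max_total (int): La suma máxima de las diferencias absolutas entre caracteres consecutivos en la subcadena.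
--             - position (int): La posición (índice) donde comienza la subcadena que tiene la suma máxima de diferencias.
--
--         Excepciones:
--             ValueError: Si el tamaño de la subcadena `whole_num` es mayor que la longitud de la cadena `letters_str`,
--                         o si `whole_num` es menor que 2.
--         """
--     n = len(letters_str)
--     # Verificamos que los parámetros sean válidos
--     if n < whole_num or whole_num < 2:
--         raise ValueError(
--             'Invalid parameters: The length of the string must be greater than or equal to the window size (n >= m), '
--             'and the window size must be at least 2.')
--
--     # Calculamos la diferencia total para la primera subcadena
--     total = sum(abs(ord(letters_str[i]) - ord(letters_str[i + 1])) for i in range(whole_num - 1))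
--     max_total = total
--     position = 1
--
--     # Recorremos la cadena con una subcadena deslizante
--     for i in range(1, n - whole_num + 1):
--         # Actualizamos la suma restando el carácter que sale y sumando el carácter que entra
--         total -= abs(ord(letters_str[i - 1]) - ord(letters_str[i]))
--         total += abs(ord(letters_str[i + whole_num - 2]) - ord(letters_str[i + whole_num - 1]))
--
--         # Verificamos si la suma actual es mayor que el máximo
--         if total > max_total:
--             max_total = total
--             position = i + 1
--
--     return max_total, position
-- ===== SOURCE B (Python) =====
-- def direct_method(letters_str, whole_num):
--     n = len(letters_str)
--     if n < whole_num or whole_num < 2: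
--         raise ValueError(
--             'Invalid parameters: The length of the string must be greater than or equal to the window size (n >= m), '
--             'and the window size must be at least 2.')
--     # adjacent ASCII differences and their prefix sums
--     P = [0]
--     for a, b in zip(letters_str, letters_str[1:]):
--         P.append(P[-1] + abs(ord(a) - ord(b)))
--     best = P[whole_num - 1] - P[0]
--     position = 1
--     for i in range(1, n - whole_num + 1):
--         w = P[i + whole_num - 1] - P[i]
--         if w > best:
--             best = w
--             position = i + 1
--     return best, position
-- ===== Notes on version B (the rewrite author's own statement) =====
-- stated objective: alternative
-- what changed: B precomputes a prefix-sum table of adjacent ASCII differences and reads each window's total as a difference of two table entries, instead of A's sliding-window incremental subtract/add update.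
import Mathlib
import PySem

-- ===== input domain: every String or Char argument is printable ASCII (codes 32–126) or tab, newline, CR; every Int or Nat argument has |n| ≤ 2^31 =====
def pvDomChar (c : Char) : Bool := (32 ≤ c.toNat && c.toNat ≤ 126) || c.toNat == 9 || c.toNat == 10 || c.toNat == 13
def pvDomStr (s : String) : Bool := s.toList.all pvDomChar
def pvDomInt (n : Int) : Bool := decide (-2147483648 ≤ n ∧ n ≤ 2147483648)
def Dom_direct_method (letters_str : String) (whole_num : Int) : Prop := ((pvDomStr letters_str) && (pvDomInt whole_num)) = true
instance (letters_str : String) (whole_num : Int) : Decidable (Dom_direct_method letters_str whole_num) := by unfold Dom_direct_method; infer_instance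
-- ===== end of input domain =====

-- B replaces A's sliding-window incremental update by a prefix-sum table of adjacent
-- ASCII differences (alternative decomposition, same O(n) cost).


-- ===== PORT A =====
-- ord(letters_str[i]) as an Int (indices used are in range under Pre_)
def pvOrdAt (cs : List Char) (i : Int) : Int :=
  (((PySem.List.pyGet? cs i).getD ' ').toNat : Int)

-- abs(ord(s[i]) - ord(s[i+1]))
def pvDiff (cs : List Char) (i : Int) : Int :=
  |pvOrdAt cs i - pvOrdAt cs (i + 1)|

def direct_method (letters_str : String) (whole_num : Int) : Int × Int :=
  let cs := letters_str.toList
  let n : Int := cs.length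
  -- total = sum(abs(ord(s[i]) - ord(s[i+1])) for i in range(whole_num - 1))
  let total0 : Int :=
    (PySem.List.pyRange 0 (whole_num - 1) 1).foldl (fun t i => t + pvDiff cs i) 0
  -- state: (total, max_total, position)
  let st := (PySem.List.pyRange 1 (n - whole_num + 1) 1).foldl
    (fun (p : Int × Int × Int) i =>
      let t := p.1 - pvDiff cs (i - 1) + pvDiff cs (i + whole_num - 2)
      if t > p.2.1 then (t, t, i + 1) else (t, p.2.1, p.2.2))
    (total0, total0, 1)
  (st.2.1, st.2.2)

-- ===== PORT B =====
-- prefix sums: P = [0]; for a,b in zip(s, s[1:]): P.append(P[-1] + abs(ord(a)-ord(b)))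
def pvPrefix (acc : Int) : List Char → List Int
  | [] => [acc]
  | [_] => [acc]
  | a :: b :: rest => acc :: pvPrefix (acc + |((a.toNat : Int)) - (b.toNat : Int)|) (b :: rest)

-- P[i] (indices used are in range under Pre_)
def pvPI (P : List Int) (i : Int) : Int := (PySem.List.pyGet? P i).getD 0

def direct_method_alt (letters_str : String) (whole_num : Int) : Int × Int :=
  let cs := letters_str.toList
  let n : Int := cs.length
  let P := pvPrefix 0 cs
  let st := (PySem.List.pyRange 1 (n - whole_num + 1) 1).foldl
    (fun (p : Int × Int) i =>
      let w := pvPI P (i + whole_num - 1) - pvPI P i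
      if w > p.1 then (w, i + 1) else p)
    (pvPI P (whole_num - 1) - pvPI P 0, 1)
  st

-- ===== PRECONDITION & SPEC =====
-- Pre_ excludes exactly the inputs on which A raises ValueError (n < whole_num or whole_num < 2).
def Pre_direct_method (letters_str : String) (whole_num : Int) : Prop :=
  2 ≤ whole_num ∧ whole_num ≤ (letters_str.toList.length : Int)
instance (letters_str : String) (whole_num : Int) : Decidable (Pre_direct_method letters_str whole_num) := by unfold Pre_direct_method; infer_instance
def pvWitness_direct_method : String × Int := ("abc", 2)

def Spec_direct_method (letters_str : String) (whole_num : Int) (out : Int × Int) : Prop := out = direct_method_alt letters_str whole_num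
instance (letters_str : String) (whole_num : Int) (out : Int × Int) : Decidable (Spec_direct_method letters_str whole_num out) := by unfold Spec_direct_method; infer_instance

-- ===== CLAIM (what is proved, stated in full; the proofs are below) =====
def Claim_equal_direct_method : Prop := ∀ (letters_str : String) (whole_num : Int), Dom_direct_method letters_str whole_num → Pre_direct_method letters_str whole_num → Spec_direct_method letters_str whole_num (direct_method letters_str whole_num)

-- ===== LEMMAS AND PROOFS =====

-- P[0] is the starting accumulator.
theorem pvPI_prefix_zero (cs : List Char) (acc : Int) :
    pvPI (pvPrefix acc cs) 0 = acc := by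
  cases cs with
  | nil => simp [pvPrefix, pvPI]
  | cons a t =>
    cases t with
    | nil => simp [pvPrefix, pvPI]
    | cons b r => simp [pvPrefix, pvPI]

theorem pvPI_cons_zero (x : Int) (l : List Int) : pvPI (x :: l) 0 = x := by
  simp [pvPI]

theorem pvPI_cons_succ (x : Int) (l : List Int) (i : Int) (h : 0 ≤ i) :
    pvPI (x :: l) (i + 1) = pvPI l i := by
  obtain ⟨k, rfl⟩ : ∃ k : Nat, i = (k : Int) := ⟨i.toNat, by omega⟩
  simp [pvPI, PySem.List.pyGet?_cons_succ]

theorem pvDiff_cons (a : Char) (l : List Char) (i : Int) (_h : 0 ≤ i) :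
    pvDiff (a :: l) (i + 1) = pvDiff l i := by
  obtain ⟨k, rfl⟩ : ∃ k : Nat, i = (k : Int) := ⟨i.toNat, by omega⟩
  unfold pvDiff pvOrdAt
  rw [show (k : Int) + 1 + 1 = ((k + 1 : Nat) : Int) + 1 by omega]
  rw [PySem.List.pyGet?_cons_succ, PySem.List.pyGet?_cons_succ]
  push_cast
  ring_nf


theorem pvDiff_cons_cons_zero (a b : Char) (r : List Char) :
    pvDiff (a :: b :: r) 0 = |((a.toNat : Int)) - (b.toNat : Int)| := by
  unfold pvDiff pvOrdAt
  rw [show (0 : Int) + 1 = ((0 : Nat) : Int) + 1 by norm_num, PySem.List.pyGet?_cons_succ]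
  simp [PySem.List.pyGet?_zero_cons]

-- Successive prefix entries differ by the adjacent ASCII difference.
theorem pvPI_prefix_succ (cs : List Char) (acc : Int) (k : Nat) (hk : k + 1 < cs.length) :
    pvPI (pvPrefix acc cs) ((k : Int) + 1) = pvPI (pvPrefix acc cs) k + pvDiff cs k := by
  induction cs generalizing acc k with
  | nil => simp at hk
  | cons a t ih =>
    cases t with
    | nil => simp at hk
    | cons b r =>
      cases k with
      | zero =>
        simp only [pvPrefix, Nat.cast_zero]
        rw [zero_add, show (1 : Int) = 0 + 1 by ring,
            pvPI_cons_succ _ _ 0 le_rfl, pvPI_prefix_zero, pvPI_cons_zero,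
            pvDiff_cons_cons_zero]
      | succ k =>
        have hk' : k + 1 < (b :: r).length := by simpa using hk
        simp only [pvPrefix]
        rw [show ((k + 1 : Nat) : Int) = (k : Int) + 1 by omega]
        rw [pvPI_cons_succ _ _ ((k : Int) + 1) (by positivity),
            pvPI_cons_succ _ _ (k : Int) (by positivity),
            pvDiff_cons _ _ (k : Int) (by positivity)]
        exact ih _ k hk'

-- Int-index version of the step fact.
theorem pvPI_step (cs : List Char) (k : Int) (h0 : 0 ≤ k) (hk : k + 1 < (cs.length : Int)) :
    pvPI (pvPrefix 0 cs) (k + 1) = pvPI (pvPrefix 0 cs) k + pvDiff cs k := by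
  have hkn : k = ((k.toNat : Nat) : Int) := by omega
  rw [hkn]
  exact pvPI_prefix_succ cs 0 k.toNat (by omega)

-- A's initial sum equals the prefix entry P[t].
theorem init_sum_eq (cs : List Char) (t : Nat) (ht : (t : Int) < (cs.length : Int) ∨ t = 0) :
    (PySem.List.pyRange 0 (t : Int) 1).foldl (fun a i => a + pvDiff cs i) 0
      = pvPI (pvPrefix 0 cs) t := by
  induction t with
  | zero => simp [PySem.List.pyRange_one_eq_nil, pvPI_prefix_zero]
  | succ t ih =>
    have ht' : (t : Int) + 1 < (cs.length : Int) ∨ (t+1) = 0 := by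
      push_cast at ht ⊢; omega
    have hlt : t + 1 < cs.length := by omega
    rw [show ((t + 1 : Nat) : Int) = (t : Int) + 1 by omega,
        PySem.List.pyRange_one_succ_right (by positivity)]
    rw [List.foldl_append]
    simp only [List.foldl_cons, List.foldl_nil]
    rw [ih (by left; omega)]
    rw [show ((t+1 : Nat) : Int) = (t : Int) + 1 by omega] at *
    rw [pvPI_step cs t (by positivity) (by exact_mod_cast hlt)]

-- Window sum at start i, read from the prefix table.
def pvW (cs : List Char) (m i : Int) : Int :=
  pvPI (pvPrefix 0 cs) (i + m - 1) - pvPI (pvPrefix 0 cs) i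

-- The two folds agree: A's running total tracks the window sum pvW.
theorem loop_eq (cs : List Char) (m K : Int) :
    ∀ (cnt : Nat) (j : Int) (b p : Int), 1 ≤ j → (K - j).toNat = cnt →
      (∀ i : Int, j ≤ i → i < K →
        pvW cs m i = pvW cs m (i-1) - pvDiff cs (i-1) + pvDiff cs (i + m - 2)) →
      ((PySem.List.pyRange j K 1).foldl
        (fun (p : Int × Int × Int) i =>
          let t := p.1 - pvDiff cs (i - 1) + pvDiff cs (i + m - 2)
          if t > p.2.1 then (t, t, i + 1) else (t, p.2.1, p.2.2))
        (pvW cs m (j-1), b, p)).2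
      = (PySem.List.pyRange j K 1).foldl
        (fun (q : Int × Int) i =>
          let w := pvPI (pvPrefix 0 cs) (i + m - 1) - pvPI (pvPrefix 0 cs) i
          if w > q.1 then (w, i + 1) else q)
        (b, p) := by
  intro cnt
  induction cnt with
  | zero =>
    intro j b p hj hcnt _
    rw [PySem.List.pyRange_one_eq_nil (by omega)]
    simp
  | succ cnt ih =>
    intro j b p hj hcnt hstep
    have hjK : j < K := by omega
    rw [PySem.List.pyRange_one_cons hjK]
    simp only [List.foldl_cons]
    have hw : pvW cs m (j-1) - pvDiff cs (j-1) + pvDiff cs (j + m - 2) = pvW cs m j := by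
      rw [hstep j (le_refl j) hjK]
    have hwdef : pvPI (pvPrefix 0 cs) (j + m - 1) - pvPI (pvPrefix 0 cs) j = pvW cs m j := rfl
    simp only [hw, hwdef]
    by_cases hc : pvW cs m j > b
    · simp only [hc, if_pos]
      have := ih (j+1) (pvW cs m j) (j+1) (by omega) (by omega)
        (fun i hi hiK => hstep i (by omega) hiK)
      rw [show j + 1 - 1 = j by ring] at this
      simpa using this
    · rw [if_neg hc, if_neg hc]
      have := ih (j+1) b p (by omega) (by omega)
        (fun i hi hiK => hstep i (by omega) hiK)
      rw [show j + 1 - 1 = j by ring] at this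
      exact this

-- ===== VERDICT (by name: the statement is the Claim_ definition above) =====
theorem direct_method_spec : Claim_equal_direct_method := by
  intro s m _ hpre
  obtain ⟨hm2, hmn⟩ := hpre
  unfold Spec_direct_method
  simp only [direct_method, direct_method_alt]
  set cs := s.toList with hcs
  set n : Int := (cs.length : Int) with hn
  -- step fact for every window start in range
  have hstep : ∀ i : Int, 1 ≤ i → i < n - m + 1 →
      pvW cs m i = pvW cs m (i-1) - pvDiff cs (i-1) + pvDiff cs (i + m - 2) := by
    intro i hi hiK
    have h1 : pvPI (pvPrefix 0 cs) i = pvPI (pvPrefix 0 cs) (i-1) + pvDiff cs (i-1) := by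
      have := pvPI_step cs (i-1) (by omega) (by omega)
      rw [show i - 1 + 1 = i by ring] at this
      exact this
    have h2 : pvPI (pvPrefix 0 cs) (i + m - 1)
        = pvPI (pvPrefix 0 cs) (i + m - 2) + pvDiff cs (i + m - 2) := by
      have := pvPI_step cs (i + m - 2) (by omega) (by omega)
      rw [show i + m - 2 + 1 = i + m - 1 by ring] at this
      exact this
    unfold pvW
    rw [h1, h2, show i - 1 + m - 1 = i + m - 2 by ring]
    ring
  -- the initial total is the first window sum
  have hinit : (PySem.List.pyRange 0 (m - 1) 1).foldl (fun t i => t + pvDiff cs i) 0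
      = pvW cs m 0 := by
    have h0 : pvPI (pvPrefix 0 cs) 0 = 0 := pvPI_prefix_zero cs 0
    unfold pvW
    rw [h0, sub_zero, show (0 : Int) + m - 1 = m - 1 by ring]
    have := init_sum_eq cs (m-1).toNat (by left; omega)
    rw [show (((m-1).toNat : Nat) : Int) = m - 1 by omega] at this
    exact this
  rw [hinit]
  have hinit' : pvPI (pvPrefix 0 cs) (m - 1) - pvPI (pvPrefix 0 cs) 0 = pvW cs m 0 := by
    unfold pvW; rw [show (0 : Int) + m - 1 = m - 1 by ring]
  rw [hinit']
  have := loop_eq cs m (n - m + 1) (n - m).toNat 1 (pvW cs m 0) 1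
    (le_refl 1) (by omega) (fun i hi hiK => hstep i hi hiK)
  rw [show (1 : Int) - 1 = 0 by ring] at this
  exact this
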